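-- pv_equiv track=rewrite | github.com/mfkiwl/KalmanVAE | VAE.py | compute_convolution_output_size
-- ===== SOURCE A (Python) =====
-- def compute_convolution_output_size(image_size, n_channels, kernel_size):
--     out_sizes = []
--     dilation = 1
--     for i, _ in enumerate(n_channels):
--         if i == 0:
--             out_size = image_size - (dilation*(kernel_size-1))
--         else:
--             out_size = out_sizes[i-1] - (dilation*(kernel_size-1))
--         out_sizes.append(out_size)
--
--     return out_sizes
-- ===== SOURCE B (Python) =====
-- def compute_convolution_output_size(image_size, n_channels, kernel_size):
--     # out_sizes[i] = image_size - (i+1)*(kernel_size-1): closed form, no accumulator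
--     step = kernel_size - 1
--     return [image_size - (i + 1) * step for i, _ in enumerate(n_channels)]
-- ===== Notes on version B (the rewrite author's own statement) =====
-- stated objective: simpler
-- what changed: Replaced the sequential accumulator that reads out_sizes[i-1] with a closed-form per-index formula image_size - (i+1)*(kernel_size-1) in a single comprehension.
import Mathlib
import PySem

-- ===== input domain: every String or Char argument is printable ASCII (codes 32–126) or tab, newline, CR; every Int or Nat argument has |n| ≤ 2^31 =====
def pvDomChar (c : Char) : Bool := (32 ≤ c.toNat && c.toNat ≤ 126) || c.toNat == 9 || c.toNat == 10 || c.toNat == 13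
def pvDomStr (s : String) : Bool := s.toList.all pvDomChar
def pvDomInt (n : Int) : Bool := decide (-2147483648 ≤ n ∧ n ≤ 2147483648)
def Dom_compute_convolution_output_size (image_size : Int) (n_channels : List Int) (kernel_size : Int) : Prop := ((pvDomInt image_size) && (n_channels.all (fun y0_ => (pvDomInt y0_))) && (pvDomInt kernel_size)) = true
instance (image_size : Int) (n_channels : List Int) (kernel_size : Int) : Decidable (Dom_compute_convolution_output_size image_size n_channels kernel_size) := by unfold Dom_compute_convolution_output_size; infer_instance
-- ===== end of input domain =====

-- B replaces A's sequential accumulator (reading out_sizes[i-1]) with the closed-form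
-- per-index value image_size - (i+1)*(kernel_size-1) in one comprehension (objective: simpler).

-- ===== PORT A =====
-- loop body of A: out_sizes[i-1] is read via pyGet?; the .getD 0 default is dead code
-- since for i > 0 the accumulator always has length i
def pvAgo (image_size kernel_size : Int) : List (Int × Int) → List Int → List Int
  | [], out_sizes => out_sizes
  | (i, _) :: rest, out_sizes =>
      let dilation : Int := 1
      let out_size : Int :=
        if i = 0 then image_size - dilation * (kernel_size - 1)
        else (PySem.List.pyGet? out_sizes (i - 1)).getD 0 - dilation * (kernel_size - 1)
      pvAgo image_size kernel_size rest (out_sizes ++ [out_size])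

def compute_convolution_output_size (image_size : Int) (n_channels : List Int) (kernel_size : Int) : List Int :=
  pvAgo image_size kernel_size (PySem.List.enumerate n_channels) []

-- ===== PORT B =====
def compute_convolution_output_size_alt (image_size : Int) (n_channels : List Int) (kernel_size : Int) : List Int :=
  let step := kernel_size - 1
  (PySem.List.enumerate n_channels).map (fun p => image_size - (p.1 + 1) * step)

-- ===== PRECONDITION & SPEC =====
def Spec_compute_convolution_output_size (image_size : Int) (n_channels : List Int) (kernel_size : Int) (out : List Int) : Prop := out = compute_convolution_output_size_alt image_size n_channels kernel_size
instance (image_size : Int) (n_channels : List Int) (kernel_size : Int) (out : List Int) : Decidable (Spec_compute_convolution_output_size image_size n_channels kernel_size out) := by unfold Spec_compute_convolution_output_size; infer_instance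

-- ===== CLAIM (what is proved, stated in full; the proofs are below) =====
def Claim_equal_compute_convolution_output_size : Prop := ∀ (image_size : Int) (n_channels : List Int) (kernel_size : Int), Dom_compute_convolution_output_size image_size n_channels kernel_size → Spec_compute_convolution_output_size image_size n_channels kernel_size (compute_convolution_output_size image_size n_channels kernel_size)

-- ===== LEMMAS AND PROOFS =====

-- A's loop, started at index n with the first n closed-form values already accumulated,
-- produces the full closed-form list.
theorem pvAgo_spec (is k : Int) (xs : List Int) : ∀ (n : Nat),
    pvAgo is k (PySem.List.enumerate xs (n : Int))
      ((List.range n).map (fun j : Nat => is - ((j : Int) + 1) * (k - 1)))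
    = (List.range (n + xs.length)).map (fun j : Nat => is - ((j : Int) + 1) * (k - 1)) := by
  induction xs with
  | nil => intro n; simp [PySem.List.enumerate_nil, pvAgo]
  | cons x xs ih =>
      intro n
      rw [PySem.List.enumerate_cons, pvAgo]
      have hout :
          (if (n : Int) = 0 then is - 1 * (k - 1)
           else (PySem.List.pyGet? ((List.range n).map (fun j : Nat => is - ((j : Int) + 1) * (k - 1))) ((n : Int) - 1)).getD 0 - 1 * (k - 1))
          = is - ((n : Int) + 1) * (k - 1) := by
        cases n with
        | zero => norm_num
        | succ m =>
            have h1 : ((m + 1 : Nat) : Int) - 1 = (m : Int) := by push_cast; ring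
            have h2 : m < (List.range (m + 1)).length := by simp
            rw [if_neg (by exact_mod_cast Nat.succ_ne_zero m), h1,
                show ((m : Int)) = ((m : Nat) : Int) from rfl,
                PySem.List.pyGet?_natCast]
            simp
            push_cast
            ring
      rw [hout]
      have hacc : ((List.range n).map (fun j : Nat => is - ((j : Int) + 1) * (k - 1))) ++ [is - ((n : Int) + 1) * (k - 1)]
          = (List.range (n + 1)).map (fun j : Nat => is - ((j : Int) + 1) * (k - 1)) := by
        rw [List.range_succ, List.map_append]; rfl
      rw [hacc, show ((n : Int) + 1) = ((n + 1 : Nat) : Int) by simp, ih (n + 1)]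
      have h3 : n + 1 + xs.length = n + (xs.length + 1) := by omega
      rw [h3]
      simp

-- B's comprehension over enumerate equals the same closed-form range map.
theorem alt_eq_range (is k : Int) (xs : List Int) :
    compute_convolution_output_size_alt is xs k
    = (List.range xs.length).map (fun j : Nat => is - ((j : Int) + 1) * (k - 1)) := by
  unfold compute_convolution_output_size_alt
  have : (PySem.List.enumerate xs).map (fun p => is - (p.1 + 1) * (k - 1))
      = ((PySem.List.enumerate xs).map (·.1)).map (fun i => is - (i + 1) * (k - 1)) := by
    rw [List.map_map]; rfl
  rw [this, PySem.List.map_fst_enumerate]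
  simp [PySem.List.pyRange_zero_natCast, List.map_map]

-- ===== VERDICT (by name: the statement is the Claim_ definition above) =====
theorem compute_convolution_output_size_spec : Claim_equal_compute_convolution_output_size := by
  intro is xs k _
  unfold Spec_compute_convolution_output_size
  rw [alt_eq_range]
  have h := pvAgo_spec is k xs 0
  simpa [compute_convolution_output_size, PySem.List.enumerate] using h
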